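-- pv_equiv track=rewrite | github.com/heavenring/BackJoonCode | 프로그래머스/2/42586. 기능개발/기능개발.py | solution
-- ===== SOURCE A (Python) =====
-- def solution(progresses, speeds):
--     # 첫번째 프로세스는 for 문에서 한번 중복되기 때문에
--     # 첫번째 프로세스 배포일에 배포하는 프로세스 수를 0으로 설정
--     answer = [0]
--
--     # 첫번째 프로세스의 배포일 계산
--     pre_complete_day = (99 - progresses[0]) // speeds[0] + 1
--     for progress, speed in zip(progresses, speeds):
--         # 현재 프로세스의 배포일 계산
--         complete_day = (99 - progress) // speed + 1
--
--         # 이전 프로세스보다 배포일이 빠르다면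
--         if complete_day <= pre_complete_day:
--             # 한번에 배포되는 프로세스 개수에 + 1
--             answer[-1] += 1
--
--         # 이전 프로세스보다 배포일이 늦다면
--         else:
--             # 이후 배포되는 프로세스를 추가한 후
--             answer.append(1)
--             # 현재 배포일을 이전 배포일에 저장
--             pre_complete_day = complete_day
--
--
--     return answer
-- ===== SOURCE B (Python) =====
-- def solution(progresses, speeds):
--     days = [(99 - p) // s + 1 for p, s in zip(progresses, speeds)]
--     return _groups(days)
--
--
-- def _groups(days):
--     # recursive head-group split: a group is the maximal prefix whose days
--     # do not exceed the day of the group's first task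
--     if not days:
--         return []
--     head = days[0]
--     k = 1
--     while k < len(days) and days[k] <= head:
--         k += 1
--     return [k] + _groups(days[k:])
-- ===== Notes on version B (the rewrite author's own statement) =====
-- stated objective: alternative
-- what changed: Replaces A's fused single pass with a running leader day and in-place answer[-1] updates by a two-stage recursive head-group split: compute the days list, then recursively peel off the maximal prefix of days not exceeding the group head's day and emit its length.
-- outside the precondition, e.g. on solution([], []): A raises IndexError, B returns []
import Mathlib
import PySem

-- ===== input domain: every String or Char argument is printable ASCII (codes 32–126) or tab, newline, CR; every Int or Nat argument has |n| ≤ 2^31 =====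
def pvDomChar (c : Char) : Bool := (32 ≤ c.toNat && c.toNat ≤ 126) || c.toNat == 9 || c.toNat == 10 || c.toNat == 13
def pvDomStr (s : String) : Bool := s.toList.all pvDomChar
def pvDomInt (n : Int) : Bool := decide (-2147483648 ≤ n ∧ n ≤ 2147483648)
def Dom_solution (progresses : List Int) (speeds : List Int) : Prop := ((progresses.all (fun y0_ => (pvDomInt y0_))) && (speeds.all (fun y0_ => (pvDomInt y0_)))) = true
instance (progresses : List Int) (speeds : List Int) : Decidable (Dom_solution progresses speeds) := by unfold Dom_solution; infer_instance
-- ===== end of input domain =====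

-- B restructures A's fused leader-tracking pass as a days list plus a recursive head-group split.


-- deployment day of one (progress, speed) pair: (99 - p) // s + 1 (shared formula of both Pythons)
def pvDay (ps : Int × Int) : Int := PySem.Int.floordiv (99 - ps.1) ps.2 + 1

-- ===== PORT A =====
-- answer[-1] += 1
def pvIncLast : List Int → List Int
  | [] => []
  | [x] => [x + 1]
  | x :: y :: xs => x :: pvIncLast (y :: xs)

-- loop body of A (state = (answer, pre_complete_day))
def pvStepA (st : List Int × Int) (ps : Int × Int) : List Int × Int :=
  let complete_day := pvDay ps
  if complete_day ≤ st.2 then (pvIncLast st.1, st.2) else (st.1 ++ [1], complete_day)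

def solution (progresses : List Int) (speeds : List Int) : List Int :=
  -- progresses[0]/speeds[0]: Pre_ guarantees nonempty lists, so the .getD 0 default is unreachable
  let pre_complete_day :=
    PySem.Int.floordiv (99 - (PySem.List.pyGet? progresses 0).getD 0)
      ((PySem.List.pyGet? speeds 0).getD 0) + 1
  ((progresses.zip speeds).foldl pvStepA ([0], pre_complete_day)).1

-- ===== PORT B =====
-- the while loop of _groups: length of the prefix of the tail with day ≤ head
def pvPrefLen (head : Int) : List Int → Nat
  | [] => 0
  | d :: ds => if d ≤ head then 1 + pvPrefLen head ds else 0

def pvGroups : List Int → List Int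
  | [] => []
  | d :: ds =>
    ((1 + pvPrefLen d ds : Nat) : Int) :: pvGroups (ds.drop (pvPrefLen d ds))
termination_by ds => ds.length
decreasing_by
  simp only [List.length_drop, List.length_cons]
  omega

def solution_alt (progresses : List Int) (speeds : List Int) : List Int :=
  let days := (progresses.zip speeds).map pvDay
  pvGroups days

-- ===== PRECONDITION & SPEC =====
-- Pre_ excludes exactly the inputs on which the Python A raises: empty progresses or speeds
-- (IndexError on progresses[0]/speeds[0]) and a zero speed among the used speeds (ZeroDivisionError).
def Pre_solution (progresses : List Int) (speeds : List Int) : Prop :=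
  progresses ≠ [] ∧ speeds ≠ [] ∧ ∀ s ∈ speeds.take progresses.length, s ≠ 0
instance (progresses : List Int) (speeds : List Int) : Decidable (Pre_solution progresses speeds) := by unfold Pre_solution; infer_instance

def pvWitness_solution : List Int × List Int := ([93, 30, 55], [1, 30, 5])

def Spec_solution (progresses : List Int) (speeds : List Int) (out : List Int) : Prop := out = solution_alt progresses speeds
instance (progresses : List Int) (speeds : List Int) (out : List Int) : Decidable (Spec_solution progresses speeds out) := by unfold Spec_solution; infer_instance

-- ===== CLAIM (what is proved, stated in full; the proofs are below) =====
def Claim_equal_solution : Prop := ∀ (progresses : List Int) (speeds : List Int), Dom_solution progresses speeds → Pre_solution progresses speeds → Spec_solution progresses speeds (solution progresses speeds)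

-- ===== LEMMAS AND PROOFS =====

-- reference run on the days list: current leader day m, open group count c
def pvRunD (m c : Int) : List Int → List Int
  | [] => [c]
  | d :: ds => if d ≤ m then pvRunD m (c + 1) ds else c :: pvRunD d 1 ds

theorem pvIncLast_append (l : List Int) (c : Int) :
    pvIncLast (l ++ [c]) = l ++ [c + 1] := by
  induction l with
  | nil => simp [pvIncLast]
  | cons x xs ih =>
    cases xs with
    | nil => simp [pvIncLast]
    | cons y ys => simpa [pvIncLast] using ih

theorem foldA_run (zs : List (Int × Int)) :
    ∀ (acc : List Int) (c m : Int),
      (zs.foldl pvStepA (acc ++ [c], m)).1 = acc ++ pvRunD m c (zs.map pvDay) := by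
  induction zs with
  | nil => intro acc c m; simp [pvRunD]
  | cons ps zs ih =>
    intro acc c m
    by_cases h : pvDay ps ≤ m
    · simp [pvStepA, h, pvRunD, pvIncLast_append, ih]
    · simp only [List.foldl_cons, pvStepA, h, List.map_cons, pvRunD]
      have := ih (acc ++ [c]) 1 (pvDay ps)
      simpa [List.append_assoc] using this

theorem groups_run (ds : List Int) :
    ∀ (m c : Int),
      pvRunD m c ds = (c + ((pvPrefLen m ds : Nat) : Int)) :: pvGroups (ds.drop (pvPrefLen m ds)) := by
  induction ds with
  | nil => intro m c; simp [pvRunD, pvPrefLen, pvGroups]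
  | cons d ds ih =>
    intro m c
    by_cases h : d ≤ m
    · rw [pvRunD, if_pos h, ih, pvPrefLen, if_pos h]
      simp only [List.drop_succ_cons, Nat.add_comm 1 (pvPrefLen m ds)]
      congr 1
      push_cast
      ring
    · rw [pvRunD, if_neg h, pvPrefLen, if_neg h]
      have hG : pvGroups (d :: ds)
          = ((1 + pvPrefLen d ds : Nat) : Int) :: pvGroups (ds.drop (pvPrefLen d ds)) := by
        simp only [pvGroups]
      rw [List.drop_zero, hG, ih d 1]
      congr 2
      push_cast
      ring

-- ===== VERDICT (by name: the statement is the Claim_ definition above) =====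
theorem solution_spec : Claim_equal_solution := by
  intro progresses speeds _ hpre
  obtain ⟨hp, hs, _⟩ := hpre
  obtain ⟨p, ps, rfl⟩ := List.exists_cons_of_ne_nil hp
  obtain ⟨s, ss, rfl⟩ := List.exists_cons_of_ne_nil hs
  unfold Spec_solution solution solution_alt
  have hg1 : (PySem.List.pyGet? (p :: ps) 0).getD 0 = p := by
    simp [PySem.List.pyGet?, PySem.List.pyIdx?]
  have hg2 : (PySem.List.pyGet? (s :: ss) 0).getD 0 = s := by
    simp [PySem.List.pyGet?, PySem.List.pyIdx?]
  have h1 : pvStepA ([0], PySem.Int.floordiv (99 - p) s + 1) (p, s)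
      = (([] : List Int) ++ [1], pvDay (p, s)) := by
    simp [pvStepA, pvDay, pvIncLast]
  simp only [List.zip_cons_cons, List.foldl_cons, List.map_cons, hg1, hg2]
  rw [h1, foldA_run]
  rw [groups_run]
  have hgr : pvGroups (pvDay (p, s) :: (ps.zip ss).map pvDay)
      = ((1 + pvPrefLen (pvDay (p, s)) ((ps.zip ss).map pvDay) : Nat) : Int)
        :: pvGroups (((ps.zip ss).map pvDay).drop (pvPrefLen (pvDay (p, s)) ((ps.zip ss).map pvDay))) := by
    simp only [pvGroups]
  rw [hgr]
  simp only [List.nil_append]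
  congr 1
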